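-- pv_equiv track=rewrite | github.com/neumanh/IgTreeZ | utils/mut_utils.py | get_rf_start
-- ===== SOURCE A (Python) =====
-- def get_rf_start(gl_start: int, seq_start: int):
--     """
--     Finds the reading frame start position
--     :param gl_start: The germline first non-gap position
--     :param seq_start: The sequence first non-gap position
--     :return: The reading frame start position
--     """
--     if gl_start >= seq_start:
--         rfs = gl_start
--     else:
--         while ((seq_start - gl_start) % 3) > 0:
--             seq_start += 1
--         rfs = seq_start
--
--     return rfs
-- ===== SOURCE B (Python) =====
-- def get_rf_start(gl_start: int, seq_start: int):
--     if gl_start >= seq_start: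
--         return gl_start
--     r = (seq_start - gl_start) % 3
--     return seq_start + ((3 - r) % 3)
-- ===== Notes on version B (the rewrite author's own statement) =====
-- stated objective: simpler
-- what changed: Replaces the while loop that increments seq_start until the difference is a multiple of 3 with a closed-form modular-arithmetic expression.
import Mathlib
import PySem

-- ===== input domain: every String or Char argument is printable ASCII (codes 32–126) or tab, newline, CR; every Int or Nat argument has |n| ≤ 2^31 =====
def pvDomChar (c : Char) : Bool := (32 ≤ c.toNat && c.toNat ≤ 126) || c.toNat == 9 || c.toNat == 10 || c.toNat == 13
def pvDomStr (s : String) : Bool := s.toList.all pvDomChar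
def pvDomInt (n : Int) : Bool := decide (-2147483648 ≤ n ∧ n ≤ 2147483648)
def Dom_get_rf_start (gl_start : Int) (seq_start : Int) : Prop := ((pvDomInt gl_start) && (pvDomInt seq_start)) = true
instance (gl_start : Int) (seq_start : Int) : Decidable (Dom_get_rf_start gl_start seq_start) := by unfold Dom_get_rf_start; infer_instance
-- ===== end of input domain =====

-- B replaces A's increment-until-multiple-of-3 while loop with a closed-form modular expression (simpler).


-- ===== PORT A =====
-- while ((seq_start - gl_start) % 3) > 0: seq_start += 1
-- fuel only makes the recursion structural: the guard's value is < 3, so the loop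
-- body runs at most twice and fuel 3 is never exhausted (proved in getRfLoop_eq).
def getRfLoop (fuel : Nat) (gl_start : Int) (seq_start : Int) : Int :=
  match fuel with
  | 0 => seq_start
  | f + 1 =>
    if PySem.Int.mod (seq_start - gl_start) 3 > 0 then
      getRfLoop f gl_start (seq_start + 1)
    else
      seq_start

def get_rf_start (gl_start : Int) (seq_start : Int) : Int :=
  if gl_start >= seq_start then gl_start
  else getRfLoop 3 gl_start seq_start

-- ===== PORT B =====
def get_rf_start_alt (gl_start : Int) (seq_start : Int) : Int :=
  if gl_start >= seq_start then gl_start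
  else
    let r := PySem.Int.mod (seq_start - gl_start) 3
    seq_start + PySem.Int.mod (3 - r) 3

-- ===== PRECONDITION & SPEC =====
def Spec_get_rf_start (gl_start : Int) (seq_start : Int) (out : Int) : Prop := out = get_rf_start_alt gl_start seq_start
instance (gl_start : Int) (seq_start : Int) (out : Int) : Decidable (Spec_get_rf_start gl_start seq_start out) := by unfold Spec_get_rf_start; infer_instance

-- ===== CLAIM (what is proved, stated in full; the proofs are below) =====
def Claim_equal_get_rf_start : Prop := ∀ (gl_start : Int) (seq_start : Int), Dom_get_rf_start gl_start seq_start → Spec_get_rf_start gl_start seq_start (get_rf_start gl_start seq_start)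

-- ===== LEMMAS AND PROOFS =====

-- ===== VERDICT (by name: the statement is the Claim_ definition above) =====
theorem getRfLoop_eq (gl_start seq_start : Int) :
    getRfLoop 3 gl_start seq_start =
      seq_start + PySem.Int.mod (3 - PySem.Int.mod (seq_start - gl_start) 3) 3 := by
  have b0 := PySem.Int.mod_nonneg (a := seq_start - gl_start) (b := 3) (by omega)
  have b0' := PySem.Int.mod_lt (a := seq_start - gl_start) (b := 3) (by omega)
  have d0 := PySem.Int.floordiv_mul_add_mod (seq_start - gl_start) 3
  have b1 := PySem.Int.mod_nonneg (a := seq_start + 1 - gl_start) (b := 3) (by omega)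
  have b1' := PySem.Int.mod_lt (a := seq_start + 1 - gl_start) (b := 3) (by omega)
  have d1 := PySem.Int.floordiv_mul_add_mod (seq_start + 1 - gl_start) 3
  have b2 := PySem.Int.mod_nonneg (a := seq_start + 1 + 1 - gl_start) (b := 3) (by omega)
  have b2' := PySem.Int.mod_lt (a := seq_start + 1 + 1 - gl_start) (b := 3) (by omega)
  have d2 := PySem.Int.floordiv_mul_add_mod (seq_start + 1 + 1 - gl_start) 3
  have bg := PySem.Int.mod_nonneg (a := 3 - PySem.Int.mod (seq_start - gl_start) 3) (b := 3) (by omega)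
  have bg' := PySem.Int.mod_lt (a := 3 - PySem.Int.mod (seq_start - gl_start) 3) (b := 3) (by omega)
  have dg := PySem.Int.floordiv_mul_add_mod (3 - PySem.Int.mod (seq_start - gl_start) 3) 3
  simp only [getRfLoop]
  split_ifs <;> omega

theorem get_rf_start_spec : Claim_equal_get_rf_start := by
  intro gl s _
  unfold Spec_get_rf_start get_rf_start get_rf_start_alt
  split
  · rfl
  · exact getRfLoop_eq gl s
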